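-- pv_equiv track=rewrite | github.com/paiml/depyler | examples/hard_run_stats.py | running_max
-- ===== SOURCE A (Python) =====
-- def running_max(data: list[int]) -> list[int]:
--     result: list[int] = []
--     if len(data) == 0:
--         return result
--     current_max: int = data[0]
--     result.append(current_max)
--     i: int = 1
--     while i < len(data):
--         if data[i] > current_max:
--             current_max = data[i]
--         result.append(current_max)
--         i = i + 1
--     return result
-- ===== SOURCE B (Python) =====
-- def running_max(data: list) -> list:
--     # Divide and conquer: running max of the whole list = running max of the
--     # left half, then the right half's running max lifted by the left's maximum.
--     if len(data) <= 1:
--         return list(data)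
--     mid = len(data) // 2
--     left = running_max(data[:mid])
--     right = running_max(data[mid:])
--     m = left[-1]
--     return left + [x if x > m else m for x in right]
-- ===== Notes on version B (the rewrite author's own statement) =====
-- stated objective: alternative
-- what changed: Replaced the single-pass index loop threading current_max with a divide-and-conquer recursion: running max of each half, then the right half's result lifted by the left half's maximum.
import Mathlib
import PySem

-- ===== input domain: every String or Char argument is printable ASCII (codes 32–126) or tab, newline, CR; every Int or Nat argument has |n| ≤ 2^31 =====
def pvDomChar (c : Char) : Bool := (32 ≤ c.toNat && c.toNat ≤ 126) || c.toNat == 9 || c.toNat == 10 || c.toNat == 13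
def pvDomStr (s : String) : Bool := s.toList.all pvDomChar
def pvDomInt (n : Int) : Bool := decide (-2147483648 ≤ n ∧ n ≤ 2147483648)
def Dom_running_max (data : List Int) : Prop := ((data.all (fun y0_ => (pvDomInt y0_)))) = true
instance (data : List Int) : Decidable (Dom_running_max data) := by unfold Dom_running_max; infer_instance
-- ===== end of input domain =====

-- B replaces A's single-pass index loop by a divide-and-conquer recursion on halves; objective: alternative.

-- ===== PORT A =====
-- the while loop: i counts up to data.length, current_max and result are threaded
def running_max_go (data : List Int) (current_max : Int) (i : Nat) (result : List Int) : List Int :=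
  if h : i < data.length then
    let x := data[i]
    let current_max' := if x > current_max then x else current_max
    running_max_go data current_max' (i + 1) (result ++ [current_max'])
  else result
termination_by data.length - i

def running_max (data : List Int) : List Int :=
  match data with
  | [] => []
  | x :: _ => running_max_go data x 1 [x]

-- ===== PORT B =====
-- divide and conquer: data[:mid] / data[mid:] with 0 ≤ mid ≤ len are exactly take/drop;
-- left[-1] on the nonempty left result is getLast!
def running_max_alt (data : List Int) : List Int :=
  if _h : data.length ≤ 1 then data
  else
    let mid := data.length / 2
    let left := running_max_alt (data.take mid)
    let right := running_max_alt (data.drop mid)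
    let m := left.getLast!
    left ++ right.map (fun x => if x > m then x else m)
termination_by data.length
decreasing_by
  · simp; omega
  · simp; omega

-- ===== PRECONDITION & SPEC =====
def Spec_running_max (data : List Int) (out : List Int) : Prop := out = running_max_alt data
instance (data : List Int) (out : List Int) : Decidable (Spec_running_max data out) := by unfold Spec_running_max; infer_instance

-- ===== CLAIM (what is proved, stated in full; the proofs are below) =====
def Claim_equal_running_max : Prop := ∀ (data : List Int), Dom_running_max data → Spec_running_max data (running_max data)

-- ===== LEMMAS AND PROOFS =====

-- reference scan: tail of the running max starting from current max cm
def rmTail (cm : Int) : List Int → List Int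
  | [] => []
  | y :: ys => (max cm y) :: rmTail (max cm y) ys

-- reference value: x :: rmTail x xs on nonempty input
def rmRef : List Int → List Int
  | [] => []
  | x :: xs => x :: rmTail x xs

theorem rmTail_append (cm : Int) (l r : List Int) :
    rmTail cm (l ++ r) = rmTail cm l ++ rmTail (l.foldl max cm) r := by
  induction l generalizing cm with
  | nil => simp [rmTail]
  | cons y ys ih => simp [rmTail, ih]

theorem rmTail_max (m c : Int) (ys : List Int) :
    rmTail (max m c) ys = (rmTail c ys).map (fun x => max m x) := by
  induction ys generalizing c with
  | nil => rfl
  | cons z zs ih => simp [rmTail, max_assoc, ih]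

theorem rmRef_map (m : Int) (r : List Int) :
    rmTail m r = (rmRef r).map (fun x => max m x) := by
  cases r with
  | nil => rfl
  | cons y ys => simp [rmRef, rmTail, rmTail_max]

theorem rmRef_getLast (x : Int) (xs : List Int) :
    (x :: rmTail x xs).getLast! = xs.foldl max x := by
  induction xs generalizing x with
  | nil => rfl
  | cons y ys ih =>
    simp only [rmTail, List.foldl]
    have h2 := ih (max x y)
    rw [show (x :: max x y :: rmTail (max x y) ys).getLast!
          = (max x y :: rmTail (max x y) ys).getLast! from by
        simp [List.getLast!, List.getLast_cons]]
    exact h2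

theorem if_gt_eq_max (m x : Int) : (if x > m then x else m) = max m x := by
  by_cases h : x > m
  · simp [h, max_eq_right (le_of_lt h)]
  · simp [h, max_eq_left (not_lt.mp h)]

theorem running_max_go_eq (data : List Int) :
    ∀ (n i : Nat) (cm : Int) (acc : List Int), data.length - i = n →
      running_max_go data cm i acc = acc ++ rmTail cm (data.drop i) := by
  intro n
  induction n with
  | zero =>
    intro i cm acc h
    rw [running_max_go]
    have hge : data.length ≤ i := by omega
    simp [Nat.not_lt.mpr hge, List.drop_eq_nil_of_le hge, rmTail]
  | succ n ih =>
    intro i cm acc h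
    rw [running_max_go]
    have hlt : i < data.length := by omega
    have hdrop : data.drop i = data[i] :: data.drop (i + 1) := List.drop_eq_getElem_cons hlt
    simp only [hlt, dif_pos]
    rw [ih (i + 1) _ _ (by omega), hdrop, rmTail, if_gt_eq_max]
    simp

theorem running_max_eq_ref (data : List Int) : running_max data = rmRef data := by
  cases data with
  | nil => rfl
  | cons x xs =>
    show running_max_go (x :: xs) x 1 [x] = rmRef (x :: xs)
    rw [running_max_go_eq (x :: xs) ((x :: xs).length - 1) 1 x [x] rfl]
    simp [rmRef]

theorem running_max_alt_eq_ref_aux :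
    ∀ (n : Nat) (data : List Int), data.length ≤ n → running_max_alt data = rmRef data := by
  intro n
  induction n with
  | zero =>
    intro data h
    cases data with
    | nil => simp [running_max_alt, rmRef]
    | cons a b => simp at h
  | succ n ih =>
    intro data hlen
    rw [running_max_alt]
    by_cases h : data.length ≤ 1
    · rw [dif_pos h]
      match data, h with
      | [], _ => rfl
      | [x], _ => rfl
    · rw [dif_neg h]
      have hmid1 : 1 ≤ data.length / 2 := by omega
      have hmid2 : data.length / 2 < data.length := by omega
      dsimp only
      rw [ih (data.take (data.length / 2)) (by rw [List.length_take_of_le (le_of_lt hmid2)]; omega),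
          ih (data.drop (data.length / 2)) (by rw [List.length_drop]; omega)]
      obtain ⟨l, ls, htake⟩ : ∃ l ls, data.take (data.length / 2) = l :: ls := by
        cases ht : data.take (data.length / 2) with
        | nil =>
          exfalso
          have hlt : (data.take (data.length / 2)).length = data.length / 2 :=
            List.length_take_of_le (le_of_lt hmid2)
          rw [ht] at hlt
          simp at hlt
          omega
        | cons a b => exact ⟨a, b, rfl⟩
      rw [htake]
      have hsplit : data = (l :: ls) ++ data.drop (data.length / 2) := by
        rw [← htake]; exact (List.take_append_drop _ data).symm
      conv_rhs => rw [hsplit]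
      have hR : rmRef ((l :: ls) ++ data.drop (data.length / 2))
          = l :: (rmTail l ls ++ rmTail (ls.foldl max l) (data.drop (data.length / 2))) := by
        simp only [List.cons_append, rmRef, rmTail_append]
      have hL : rmRef (l :: ls) = l :: rmTail l ls := rfl
      rw [hL, hR, funext (if_gt_eq_max ((l :: rmTail l ls).getLast!)), rmRef_getLast, ← rmRef_map]
      simp

theorem running_max_alt_eq_ref (data : List Int) : running_max_alt data = rmRef data :=
  running_max_alt_eq_ref_aux data.length data le_rfl

-- ===== VERDICT (by name: the statement is the Claim_ definition above) =====
theorem running_max_spec : Claim_equal_running_max := by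
  intro data _
  unfold Spec_running_max
  rw [running_max_eq_ref, running_max_alt_eq_ref]
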